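-- pv_equiv track=rewrite | github.com/udub2000/ai-business-diagnostic-backend | app/main-working.py | build_confidence_explanation
-- ===== SOURCE A (Python) =====
-- from typing import Any, Dict, Generator, Optional
--
-- def build_confidence_explanation(scores: Dict[str, int], assumptions: list[str], contradictions: list[str], no_constraint: bool, notes_dominant_mode: bool = False) -> str:
--     reasons = []
--     numeric_scores = {
--         key: value
--         for key, value in scores.items()
--         if isinstance(value, (int, float))
--     }
--
--     if notes_dominant_mode:
--         reasons.append("the report relies primarily on narrative notes because structured intake data was sparse")
--     if assumptions:
--         reasons.append(f"{len(assumptions)} assumption(s) were needed because some inputs were estimated or missing")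
--     if contradictions:
--         reasons.append(f"{len(contradictions)} contradiction(s) reduced confidence in the consistency of the inputs")
--     if no_constraint and not notes_dominant_mode and numeric_scores:
--         reasons.append("scores were strong and tightly grouped across categories")
--     elif not no_constraint and not notes_dominant_mode and len(numeric_scores) > 1:
--         ordered = sorted(numeric_scores.items(), key=lambda x: x[1])
--         gap = ordered[1][1] - ordered[0][1]
--         reasons.append(f"the gap between the weakest and next-weakest category was {gap} point(s)")
--     elif not numeric_scores:
--         reasons.append("category scores were unavailable or intentionally suppressed for this assessment")
--     if not reasons:
--         return "Confidence is supported by fairly complete and internally consistent inputs."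
--     return "Confidence is influenced by " + "; ".join(reasons) + "."
-- ===== SOURCE B (Python) =====
-- def build_confidence_explanation(scores, assumptions, contradictions, no_constraint, notes_dominant_mode=False):
--     numeric_scores = {
--         key: value
--         for key, value in scores.items()
--         if isinstance(value, (int, float))
--     }
--
--     flagged = (
--         (notes_dominant_mode, "the report relies primarily on narrative notes because structured intake data was sparse"),
--         (bool(assumptions), f"{len(assumptions)} assumption(s) were needed because some inputs were estimated or missing"),
--         (bool(contradictions), f"{len(contradictions)} contradiction(s) reduced confidence in the consistency of the inputs"),
--     )
--     reasons = [message for flag, message in flagged if flag]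
--
--     unavailable = "category scores were unavailable or intentionally suppressed for this assessment"
--     if notes_dominant_mode:
--         branch = None if numeric_scores else unavailable
--     elif no_constraint:
--         branch = "scores were strong and tightly grouped across categories" if numeric_scores else unavailable
--     elif len(numeric_scores) > 1:
--         # one linear pass keeping the smallest and second-smallest values
--         m1 = m2 = None
--         for v in numeric_scores.values():
--             if m1 is None or v < m1:
--                 m1, m2 = v, m1
--             elif m2 is None or v < m2:
--                 m2 = v
--         branch = f"the gap between the weakest and next-weakest category was {m2 - m1} point(s)"
--     elif not numeric_scores:
--         branch = unavailable
--     else: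
--         branch = None
--     if branch:
--         reasons.append(branch)
--
--     if not reasons:
--         return "Confidence is supported by fairly complete and internally consistent inputs."
--     return "Confidence is influenced by " + "; ".join(reasons) + "."
-- ===== Notes on version B (the rewrite author's own statement) =====
-- stated objective: alternative
-- what changed: B finds the weakest/next-weakest gap with a single linear two-smallest scan over the values instead of sorting the items, and assembles the reasons declaratively from (flag, message) pairs plus an Option-valued branch instead of A's imperative append/elif chain.
import Mathlib
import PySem

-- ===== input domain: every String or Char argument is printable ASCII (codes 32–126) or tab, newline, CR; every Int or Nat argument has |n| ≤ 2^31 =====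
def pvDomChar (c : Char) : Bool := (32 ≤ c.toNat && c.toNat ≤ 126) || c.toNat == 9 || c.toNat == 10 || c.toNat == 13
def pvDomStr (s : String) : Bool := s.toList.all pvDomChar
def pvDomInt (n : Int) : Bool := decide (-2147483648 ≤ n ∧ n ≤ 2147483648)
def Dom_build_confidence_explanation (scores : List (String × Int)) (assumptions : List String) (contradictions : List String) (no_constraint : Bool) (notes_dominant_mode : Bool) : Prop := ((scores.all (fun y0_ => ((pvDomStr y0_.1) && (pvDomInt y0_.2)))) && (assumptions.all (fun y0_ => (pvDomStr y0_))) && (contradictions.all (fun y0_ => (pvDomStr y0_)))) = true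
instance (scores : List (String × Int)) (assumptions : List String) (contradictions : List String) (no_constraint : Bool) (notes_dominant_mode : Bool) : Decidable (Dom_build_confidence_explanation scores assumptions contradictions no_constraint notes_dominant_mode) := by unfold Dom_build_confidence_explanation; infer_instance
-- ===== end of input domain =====

-- B computes the two smallest scores in one linear pass instead of sorting, and builds the
-- reason list declaratively from (flag, message) pairs plus an Option-valued branch (alternative).


-- ===== PORT A =====
-- literal transliteration of A: three conditional appends, then the if/elif chain with a
-- sort of the items by value to read off the gap, then the join.
def build_confidence_explanation (scores : List (String × Int)) (assumptions : List String) (contradictions : List String) (no_constraint : Bool) (notes_dominant_mode : Bool) : String :=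
  -- numeric_scores: every value is an int under the type convention, so the isinstance filter keeps every item
  let numeric_scores := PySem.Dict.ofList scores
  let reasons : List String := []
  let reasons := if notes_dominant_mode then reasons ++ ["the report relies primarily on narrative notes because structured intake data was sparse"] else reasons
  let reasons := if assumptions.isEmpty then reasons else reasons ++ [PySem.Int.toStr (assumptions.length : Int) ++ " assumption(s) were needed because some inputs were estimated or missing"]
  let reasons := if contradictions.isEmpty then reasons else reasons ++ [PySem.Int.toStr (contradictions.length : Int) ++ " contradiction(s) reduced confidence in the consistency of the inputs"]
  let reasons :=
    if no_constraint && !notes_dominant_mode && !numeric_scores.items.isEmpty then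
      reasons ++ ["scores were strong and tightly grouped across categories"]
    else if !no_constraint && !notes_dominant_mode && decide (1 < numeric_scores.items.length) then
      let ordered := PySem.List.sorted numeric_scores.items (fun x => x.2) false
      let gap := (PySem.List.pyGetD ordered 1 ("", 0)).2 - (PySem.List.pyGetD ordered 0 ("", 0)).2
      reasons ++ ["the gap between the weakest and next-weakest category was " ++ PySem.Int.toStr gap ++ " point(s)"]
    else if numeric_scores.items.isEmpty then
      reasons ++ ["category scores were unavailable or intentionally suppressed for this assessment"]
    else reasons
  if reasons.isEmpty then "Confidence is supported by fairly complete and internally consistent inputs."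
  else "Confidence is influenced by " ++ PySem.Str.join "; " reasons ++ "."

-- ===== PORT B =====
-- B-side helper: the loop body of Source B's single pass that keeps the smallest (m1) and
-- second-smallest (m2) value seen so far, state encoded as (m1, m2)
def pvStep (p : Option Int × Option Int) (v : Int) : Option Int × Option Int :=
  match p with
  | (none, m2) => (some v, m2)                     -- if m1 is None: m1, m2 = v, m1 (m1 was None)
  | (some a, none) =>                              -- m2 is None
    if v < a then (some v, some a) else (some a, some v)
  | (some a, some b) =>
    if v < a then (some v, some a)                 -- m1, m2 = v, m1
    else if v < b then (some a, some v)            -- m2 = v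
    else (some a, some b)

-- literal transliteration of Source B: declarative (flag, message) comprehension, an
-- Option-valued branch, with the two-smallest scan (pvStep) instead of the sort.
def build_confidence_explanation_alt (scores : List (String × Int)) (assumptions : List String) (contradictions : List String) (no_constraint : Bool) (notes_dominant_mode : Bool) : String :=
  let numeric_scores := PySem.Dict.ofList scores
  let flagged : List (Bool × String) :=
    [(notes_dominant_mode, "the report relies primarily on narrative notes because structured intake data was sparse"),
     (!assumptions.isEmpty, PySem.Int.toStr (assumptions.length : Int) ++ " assumption(s) were needed because some inputs were estimated or missing"),
     (!contradictions.isEmpty, PySem.Int.toStr (contradictions.length : Int) ++ " contradiction(s) reduced confidence in the consistency of the inputs")]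
  let reasons := flagged.filterMap (fun p => if p.1 then some p.2 else none)
  let branch : Option String :=
    if notes_dominant_mode then
      (if numeric_scores.items.isEmpty then some "category scores were unavailable or intentionally suppressed for this assessment" else none)
    else if no_constraint then
      (if numeric_scores.items.isEmpty then some "category scores were unavailable or intentionally suppressed for this assessment"
       else some "scores were strong and tightly grouped across categories")
    else if decide (1 < numeric_scores.items.length) then
      let st := (PySem.Dict.values numeric_scores).foldl pvStep (none, none)
      some ("the gap between the weakest and next-weakest category was " ++ PySem.Int.toStr (st.2.getD 0 - st.1.getD 0) ++ " point(s)")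
    else if numeric_scores.items.isEmpty then some "category scores were unavailable or intentionally suppressed for this assessment"
    else none
  let reasons := reasons ++ branch.toList
  if reasons.isEmpty then "Confidence is supported by fairly complete and internally consistent inputs."
  else "Confidence is influenced by " ++ PySem.Str.join "; " reasons ++ "."

-- ===== PRECONDITION & SPEC =====
def Spec_build_confidence_explanation (scores : List (String × Int)) (assumptions : List String) (contradictions : List String) (no_constraint : Bool) (notes_dominant_mode : Bool) (out : String) : Prop := out = build_confidence_explanation_alt scores assumptions contradictions no_constraint notes_dominant_mode
instance (scores : List (String × Int)) (assumptions : List String) (contradictions : List String) (no_constraint : Bool) (notes_dominant_mode : Bool) (out : String) : Decidable (Spec_build_confidence_explanation scores assumptions contradictions no_constraint notes_dominant_mode out) := by unfold Spec_build_confidence_explanation; infer_instance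

-- ===== CLAIM (what is proved, stated in full; the proofs are below) =====
def Claim_equal_build_confidence_explanation : Prop := ∀ (scores : List (String × Int)) (assumptions : List String) (contradictions : List String) (no_constraint : Bool) (notes_dominant_mode : Bool), Dom_build_confidence_explanation scores assumptions contradictions no_constraint notes_dominant_mode → Spec_build_confidence_explanation scores assumptions contradictions no_constraint notes_dominant_mode (build_confidence_explanation scores assumptions contradictions no_constraint notes_dominant_mode)

-- ===== LEMMAS AND PROOFS =====

-- first two elements of a list, as B's scan state
def pvEnc (t : List Int) : Option Int × Option Int :=
  match t with
  | [] => (none, none)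
  | [a] => (some a, none)
  | a :: b :: _ => (some a, some b)

theorem pvStep_insertBy (acc : List Int) (v : Int) :
    pvStep (pvEnc acc) v = pvEnc (PySem.List.insertBy (fun a b => decide (a < b)) v acc) := by
  match acc with
  | [] => rfl
  | [a] =>
    simp only [PySem.List.insertBy, pvEnc, pvStep]
    by_cases h : v < a <;> simp [h, PySem.List.insertBy]
  | a :: b :: t =>
    simp only [PySem.List.insertBy, pvEnc, pvStep]
    by_cases h1 : v < a
    · simp [h1]
    · by_cases h2 : v < b <;> simp [h1, h2, PySem.List.insertBy]

theorem pvScan_foldl (l : List Int) (acc : List Int) :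
    l.foldl pvStep (pvEnc acc) =
      pvEnc (l.foldl (fun s x => PySem.List.insertBy (fun a b => decide (a < b)) x s) acc) := by
  induction l generalizing acc with
  | nil => rfl
  | cons x xs ih =>
    simp only [List.foldl_cons, pvStep_insertBy]
    exact ih _

theorem pvScan_sorted (l : List Int) :
    l.foldl pvStep (none, none) = pvEnc (PySem.List.sorted l (fun x => x) false) := by
  have h := pvScan_foldl l []
  simpa [pvEnc, PySem.List.sorted_eq_foldl_insertBy] using h

theorem pvMap_key_sorted (xs : List (String × Int)) :
    PySem.List.sorted (xs.map (fun p => p.2)) (fun x => x) false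
      = (PySem.List.sorted xs (fun p => p.2) false).map (fun p => p.2) := by
  exact PySem.List.sorted_id_eq_of_perm_of_pairwise
    (xs.map (fun p => p.2)) ((PySem.List.sorted xs (fun p => p.2) false).map (fun p => p.2))
    ((PySem.List.sorted_perm xs (fun p => p.2) false).map _)
    (PySem.List.sorted_map_key_pairwise xs (fun p => p.2))

-- B's scanned gap equals A's sorted gap when there are at least two items
theorem pvGap_eq (xs : List (String × Int)) (h : 1 < xs.length) :
    ((xs.map (fun p => p.2)).foldl pvStep (none, none)).2.getD 0
      - ((xs.map (fun p => p.2)).foldl pvStep (none, none)).1.getD 0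
      = (PySem.List.pyGetD (PySem.List.sorted xs (fun x => x.2) false) 1 ("", 0)).2
        - (PySem.List.pyGetD (PySem.List.sorted xs (fun x => x.2) false) 0 ("", 0)).2 := by
  have hlen : (PySem.List.sorted xs (fun x => x.2) false).length = xs.length :=
    PySem.List.length_sorted xs _ false
  have hsc := pvScan_sorted (xs.map (fun p => p.2))
  rw [pvMap_key_sorted] at hsc
  match hs : PySem.List.sorted xs (fun x => x.2) false with
  | [] => rw [hs] at hlen; simp at hlen; omega
  | [p] => rw [hs] at hlen; simp at hlen; omega
  | p0 :: p1 :: rest =>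
    rw [hs] at hsc
    simp only [List.map_cons, pvEnc] at hsc
    rw [hsc]
    simp [PySem.List.pyGetD]

-- the four-way elif chain of A equals B's Option-valued branch appended to the reasons
theorem pvBranch_eq (nc ndm : Bool) (xs : List (String × Int)) (r : List String) :
    (if nc && !ndm && !xs.isEmpty then
       r ++ ["scores were strong and tightly grouped across categories"]
     else if !nc && !ndm && decide (1 < xs.length) then
       r ++ ["the gap between the weakest and next-weakest category was "
              ++ PySem.Int.toStr ((PySem.List.pyGetD (PySem.List.sorted xs (fun x => x.2) false) 1 ("", 0)).2
                  - (PySem.List.pyGetD (PySem.List.sorted xs (fun x => x.2) false) 0 ("", 0)).2)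
              ++ " point(s)"]
     else if xs.isEmpty then
       r ++ ["category scores were unavailable or intentionally suppressed for this assessment"]
     else r)
    = r ++ (if ndm then
              (if xs.isEmpty then some "category scores were unavailable or intentionally suppressed for this assessment" else none)
            else if nc then
              (if xs.isEmpty then some "category scores were unavailable or intentionally suppressed for this assessment"
               else some "scores were strong and tightly grouped across categories")
            else if decide (1 < xs.length) then
              some ("the gap between the weakest and next-weakest category was "
                     ++ PySem.Int.toStr (((xs.map (fun p => p.2)).foldl pvStep (none, none)).2.getD 0
                         - ((xs.map (fun p => p.2)).foldl pvStep (none, none)).1.getD 0)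
                     ++ " point(s)")
            else if xs.isEmpty then some "category scores were unavailable or intentionally suppressed for this assessment"
            else none).toList := by
  cases nc <;> cases ndm <;> rcases xs with _ | ⟨p, _ | ⟨q, t⟩⟩ <;> simp
  all_goals {
    have hg := pvGap_eq (p :: q :: t) (by simp)
    simp only [List.map_cons, List.foldl_cons] at hg
    rw [hg] }

theorem pvPorts_eq (scores : List (String × Int)) (assumptions : List String) (contradictions : List String) (no_constraint : Bool) (notes_dominant_mode : Bool) :
    build_confidence_explanation scores assumptions contradictions no_constraint notes_dominant_mode
      = build_confidence_explanation_alt scores assumptions contradictions no_constraint notes_dominant_mode := by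
  unfold build_confidence_explanation build_confidence_explanation_alt
  have hv : PySem.Dict.values (PySem.Dict.ofList scores)
      = (PySem.Dict.ofList scores).items.map (fun p => p.2) := rfl
  simp only [hv, pvBranch_eq]
  cases notes_dominant_mode <;> cases assumptions <;> cases contradictions <;>
    simp [List.filterMap]

-- ===== VERDICT (by name: the statement is the Claim_ definition above) =====
theorem build_confidence_explanation_spec : Claim_equal_build_confidence_explanation := by
  intro scores assumptions contradictions no_constraint notes_dominant_mode _
  unfold Spec_build_confidence_explanation
  exact pvPorts_eq scores assumptions contradictions no_constraint notes_dominant_mode
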